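-- pv_equiv track=rewrite | github.com/rmcreyes/cpen391-de1 | src/photo_preprocessing.py | separate_sides
-- ===== SOURCE A (Python) =====
-- def separate_sides(vertex_array, index):
--     # get the indices of either the top corners or right corners
--     # 0 - top corners ; 1 - right corners
--
--     target_indices = []
--     max_value = float('-inf')
--     max_index = 0
--     for idx,a in enumerate(vertex_array):
--         if (a[index] > max_value):
--             max_index = idx
--             max_value = a[index]
--
--     target_indices.append(max_index)
--
--     max_value = float('-inf')
--     for idx,a in enumerate(vertex_array):
--         if (a[index] > max_value) and (idx not in target_indices):
--             max_index = idx
--             max_value = a[index]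
--
--     target_indices.append(max_index)
--
--
--     return target_indices
-- ===== SOURCE B (Python) =====
-- def separate_sides(vertex_array, index):
--     # single pass keeping the two running winners (None = nothing seen yet)
--     best_i, best_v = 0, None
--     sec_i, sec_v = 0, None
--     for i, a in enumerate(vertex_array):
--         v = a[index]
--         if best_v is None or v > best_v:
--             sec_i, sec_v = best_i, best_v
--             best_i, best_v = i, v
--         elif sec_v is None or v > sec_v:
--             sec_i, sec_v = i, v
--     return [best_i, sec_i if sec_v is not None else best_i]
-- ===== Notes on version B (the rewrite author's own statement) =====
-- stated objective: alternative
-- what changed: B replaces A's two full scans (argmax, then argmax excluding the winner) with a single pass that maintains the top-two running winners, demoting the old best into second place whenever a new best appears.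
import Mathlib
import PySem

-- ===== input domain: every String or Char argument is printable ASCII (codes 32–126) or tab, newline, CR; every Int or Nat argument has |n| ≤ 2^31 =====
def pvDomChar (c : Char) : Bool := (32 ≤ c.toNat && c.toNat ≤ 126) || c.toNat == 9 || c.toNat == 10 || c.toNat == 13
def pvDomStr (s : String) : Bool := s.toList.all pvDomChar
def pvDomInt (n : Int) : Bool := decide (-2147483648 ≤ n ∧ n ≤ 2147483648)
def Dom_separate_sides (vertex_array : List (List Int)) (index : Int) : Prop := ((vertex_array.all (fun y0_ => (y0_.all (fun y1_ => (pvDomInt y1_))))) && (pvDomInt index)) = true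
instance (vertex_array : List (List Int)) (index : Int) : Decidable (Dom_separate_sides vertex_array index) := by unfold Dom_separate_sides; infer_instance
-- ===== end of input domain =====

-- B does the same job in one pass over the list instead of A's two scans; equal cost, different loop structure.

-- ===== PORT A =====
-- `pvGtOpt v m` is Python's `v > max_value` where `max_value` is `float('-inf')` (none) or an int (some):
-- against -inf every int compares greater, so `none ↦ true`; exact for the int values both ports compare.
def pvGtOpt (v : Int) (m : Option Int) : Bool :=
  match m with
  | none => true
  | some mv => decide (mv < v)

-- a[index] with Python indexing; Pre_ guarantees the index is in range, where Python would not raise.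
def pvVal (index : Int) (p : Int × List Int) : Int := PySem.List.pyGetD p.2 index 0

-- body of A's first loop: update (max_index, max_value) when a[index] > max_value
def pvStep1 (index : Int) (st : Int × Option Int) (p : Int × List Int) : Int × Option Int :=
  if pvGtOpt (pvVal index p) st.2 then (p.1, some (pvVal index p)) else st

-- body of A's second loop: also require idx not in target_indices (= [j])
def pvStep2 (index j : Int) (st : Int × Option Int) (p : Int × List Int) : Int × Option Int :=
  if pvGtOpt (pvVal index p) st.2 ∧ p.1 ∉ ([j] : List Int) then (p.1, some (pvVal index p)) else st

def separate_sides (vertex_array : List (List Int)) (index : Int) : List Int :=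
  let s1 := (PySem.List.enumerate vertex_array).foldl (pvStep1 index) (0, none)
  -- target_indices = [max_index]; second loop's max_index starts at s1.1 (carried over), max_value at -inf
  let s2 := (PySem.List.enumerate vertex_array).foldl (pvStep2 index s1.1) (s1.1, none)
  [s1.1, s2.1]

-- ===== PORT B =====
-- body of B's loop: state ((best_i, best_v), (sec_i, sec_v)), None modelled by Option
def pvStepB (index : Int) (st : (Int × Option Int) × (Int × Option Int)) (p : Int × List Int) :
    (Int × Option Int) × (Int × Option Int) :=
  if pvGtOpt (pvVal index p) st.1.2 then ((p.1, some (pvVal index p)), st.1)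
  else if pvGtOpt (pvVal index p) st.2.2 then (st.1, (p.1, some (pvVal index p)))
  else st

def separate_sides_alt (vertex_array : List (List Int)) (index : Int) : List Int :=
  let st := (PySem.List.enumerate vertex_array).foldl (pvStepB index) ((0, none), (0, none))
  [st.1.1, if st.2.2.isSome then st.2.1 else st.1.1]

-- ===== PRECONDITION & SPEC =====
-- Pre_ excludes exactly the inputs where Python's a[index] raises IndexError (some row too short).
def Pre_separate_sides (vertex_array : List (List Int)) (index : Int) : Prop :=
  ∀ a ∈ vertex_array, -(a.length : Int) ≤ index ∧ index < (a.length : Int)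
instance (vertex_array : List (List Int)) (index : Int) : Decidable (Pre_separate_sides vertex_array index) := by unfold Pre_separate_sides; infer_instance

def pvWitness_separate_sides : List (List Int) × Int := ([[1, 2], [5, 0], [3, 7]], 1)

def Spec_separate_sides (vertex_array : List (List Int)) (index : Int) (out : List Int) : Prop := out = separate_sides_alt vertex_array index
instance (vertex_array : List (List Int)) (index : Int) (out : List Int) : Decidable (Spec_separate_sides vertex_array index out) := by unfold Spec_separate_sides; infer_instance

-- ===== CLAIM (what is proved, stated in full; the proofs are below) =====
def Claim_equal_separate_sides : Prop := ∀ (vertex_array : List (List Int)) (index : Int), Dom_separate_sides vertex_array index → Pre_separate_sides vertex_array index → Spec_separate_sides vertex_array index (separate_sides vertex_array index)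

-- ===== LEMMAS AND PROOFS =====

-- B's best component evolves exactly like A's first scan.
theorem pvFold_fst (index : Int) (ps : List (Int × List Int)) :
    ∀ (b s : Int × Option Int), (ps.foldl (pvStepB index) (b, s)).1 = ps.foldl (pvStep1 index) b := by
  induction ps with
  | nil => intro b s; rfl
  | cons p rest ih =>
    intro b s
    simp only [List.foldl_cons, pvStepB, pvStep1]
    by_cases h : pvGtOpt (pvVal index p) b.2 = true
    · simp [h, ih]
    · simp only [Bool.not_eq_true] at h
      by_cases h2 : pvGtOpt (pvVal index p) s.2 = true <;> simp [h, h2, ih]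

-- A's second scan is its first scan over the list with index j filtered out.
theorem pvFold2_filter (index j : Int) (ps : List (Int × List Int)) :
    ∀ (st : Int × Option Int),
      ps.foldl (pvStep2 index j) st =
        (ps.filter (fun p => decide (p.1 ≠ j))).foldl (pvStep1 index) st := by
  induction ps with
  | nil => intro st; rfl
  | cons p rest ih =>
    intro st
    by_cases hj : p.1 = j
    · simp [pvStep2, hj, ih]
    · simp only [List.foldl_cons, List.filter_cons]
      simp [pvStep2, pvStep1, hj, ih]

-- scan1 keeps a some value once it has one
theorem pvFold1_isSome (index : Int) (ps : List (Int × List Int)) :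
    ∀ (st : Int × Option Int), st.2.isSome → (ps.foldl (pvStep1 index) st).2.isSome := by
  induction ps with
  | nil => intro st h; exact h
  | cons p rest ih =>
    intro st h
    simp only [List.foldl_cons, pvStep1]
    split
    · exact ih _ rfl
    · exact ih _ h

-- if scan1's result has no value, nothing fired: the result is the start state
theorem pvFold1_none (index : Int) (ps : List (Int × List Int)) :
    ∀ (st : Int × Option Int), (ps.foldl (pvStep1 index) st).2 = none →
      ps.foldl (pvStep1 index) st = st := by
  induction ps with
  | nil => intro st _; rfl
  | cons p rest ih =>
    intro st h
    simp only [List.foldl_cons, pvStep1] at h ⊢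
    by_cases hg : pvGtOpt (pvVal index p) st.2 = true
    · exfalso
      rw [if_pos hg] at h
      have := pvFold1_isSome index rest (p.1, some (pvVal index p)) rfl
      rw [h] at this; simp at this
    · rw [if_neg hg] at h ⊢
      exact ih st h

-- the start index of a none-valued start does not matter on a nonempty list
theorem pvFold1_none_start (index : Int) (p : Int × List Int) (ps : List (Int × List Int)) (i i' : Int) :
    (p :: ps).foldl (pvStep1 index) (i, none) = (p :: ps).foldl (pvStep1 index) (i', none) := by
  simp [pvStep1, pvGtOpt]

-- if scan1 moved, the resulting index comes from the list
theorem pvFold1_idx_mem (index : Int) (ps : List (Int × List Int)) :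
    ∀ (st : Int × Option Int), ps.foldl (pvStep1 index) st ≠ st →
      ∃ p ∈ ps, (ps.foldl (pvStep1 index) st).1 = p.1 := by
  induction ps with
  | nil => intro st h; exact absurd rfl h
  | cons p rest ih =>
    intro st h
    simp only [List.foldl_cons, pvStep1] at h ⊢
    by_cases hg : pvGtOpt (pvVal index p) st.2 = true
    · rw [if_pos hg] at h ⊢
      by_cases h2 : rest.foldl (pvStep1 index) (p.1, some (pvVal index p)) = (p.1, some (pvVal index p))
      · exact ⟨p, List.mem_cons_self, by rw [h2]⟩
      · obtain ⟨q, hq, hq2⟩ := ih _ h2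
        exact ⟨q, List.mem_cons_of_mem _ hq, hq2⟩
    · rw [if_neg hg] at h ⊢
      obtain ⟨q, hq, hq2⟩ := ih _ h
      exact ⟨q, List.mem_cons_of_mem _ hq, hq2⟩
  
-- scan1 from a some value only ever increases that value
theorem pvFold1_val_ge (index : Int) (ps : List (Int × List Int)) :
    ∀ (i v : Int), ∃ m, (ps.foldl (pvStep1 index) (i, some v)).2 = some m ∧ v ≤ m := by
  induction ps with
  | nil => intro i v; exact ⟨v, rfl, le_refl v⟩
  | cons p rest ih =>
    intro i v
    simp only [List.foldl_cons, pvStep1]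
    by_cases h : pvGtOpt (pvVal index p) (some v) = true
    · simp only [h, if_pos]
      obtain ⟨m, hm, hv⟩ := ih p.1 (pvVal index p)
      simp only [pvGtOpt, decide_eq_true_eq] at h
      exact ⟨m, by simpa using hm, by omega⟩
    · simp only [h]
      simpa using ih i v

-- KEY: B's second component, in terms of A-style scans.
theorem pvFoldB_snd (index : Int) (ps : List (Int × List Int)) :
    ∀ (b s : Int × Option Int), ps.Pairwise (fun p q => p.1 ≠ q.1) →
      (ps.foldl (pvStepB index) (b, s)).2 =
        (if ps.foldl (pvStep1 index) b = b then ps.foldl (pvStep1 index) s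
         else (ps.filter (fun p => decide (p.1 ≠ (ps.foldl (pvStep1 index) b).1))).foldl
                (pvStep1 index) b) := by
  induction ps with
  | nil => intro b s _; simp
  | cons p rest ih =>
    intro b s hpw
    have hpw' := (List.pairwise_cons.mp hpw).2
    have hne := (List.pairwise_cons.mp hpw).1
    by_cases h : pvGtOpt (pvVal index p) b.2 = true
    · -- p beats the current best: best demoted into second
      have hstep : (p :: rest).foldl (pvStepB index) (b, s)
          = rest.foldl (pvStepB index) ((p.1, some (pvVal index p)), b) := by
        simp [pvStepB, h]
      have hstep1 : (p :: rest).foldl (pvStep1 index) b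
          = rest.foldl (pvStep1 index) (p.1, some (pvVal index p)) := by
        simp [pvStep1, h]
      -- the final best differs from b
      have hbne : (p :: rest).foldl (pvStep1 index) b ≠ b := by
        rw [hstep1]
        obtain ⟨m, hm, hvm⟩ := pvFold1_val_ge index rest p.1 (pvVal index p)
        intro hEq
        cases hb : b.2 with
        | none => rw [hEq] at hm; rw [hb] at hm; exact (by simp at hm)
        | some bv =>
          rw [hEq, hb] at hm
          have : bv = m := by simpa using hm
          simp only [pvGtOpt, hb, decide_eq_true_eq] at h
          omega
      rw [hstep, hstep1, if_neg (by rw [← hstep1]; exact hbne)]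
      rw [ih (p.1, some (pvVal index p)) b hpw']
      by_cases hrest : rest.foldl (pvStep1 index) (p.1, some (pvVal index p)) = (p.1, some (pvVal index p))
      · -- nothing in rest beats p: the final best index is p.1, filter drops exactly p
        rw [if_pos hrest, hrest]
        have hfil : (p :: rest).filter (fun q => decide (q.1 ≠ p.1)) = rest := by
          rw [List.filter_cons, if_neg (by simp)]
          exact List.filter_eq_self.mpr (fun q hq => by simpa using (hne q hq).symm)
        rw [hfil]
      · -- something in rest beats p: final best index lies in rest, so p survives the filter
        rw [if_neg hrest]
        obtain ⟨q, hq, hq2⟩ := pvFold1_idx_mem index rest _ hrest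
        set j := (rest.foldl (pvStep1 index) (p.1, some (pvVal index p))).1 with hj
        have hpj : p.1 ≠ j := by rw [hq2]; exact hne q hq
        rw [List.filter_cons, if_pos (by simpa using hpj)]
        simp [pvStep1, h]
    · -- p does not beat the best: second updates as a scan1 step
      have hstep : (p :: rest).foldl (pvStepB index) (b, s)
          = rest.foldl (pvStepB index) (b, pvStep1 index s p) := by
        by_cases h2 : pvGtOpt (pvVal index p) s.2 = true <;>
          simp [pvStepB, pvStep1, h, h2]
      have hstep1 : (p :: rest).foldl (pvStep1 index) b = rest.foldl (pvStep1 index) b := by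
        simp [pvStep1, h]
      rw [hstep, hstep1, ih b (pvStep1 index s p) hpw']
      by_cases hb : rest.foldl (pvStep1 index) b = b
      · rw [if_pos hb, if_pos hb]
        simp [pvStep1]
      · rw [if_neg hb, if_neg hb]
        obtain ⟨q, hq, hq2⟩ := pvFold1_idx_mem index rest _ hb
        have hpj : p.1 ≠ (rest.foldl (pvStep1 index) b).1 := by rw [hq2]; exact hne q hq
        rw [List.filter_cons, if_pos (by simpa using hpj)]
        simp [pvStep1, h]

theorem pvEnum_pairwise (va : List (List Int)) :
    (PySem.List.enumerate va).Pairwise (fun p q => p.1 ≠ q.1) :=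
  (PySem.List.pairwise_lt_enumerate va 0).imp (fun h => by omega)

-- assembly over an arbitrary index-distinct list: A's two-scan output equals B's one-pass output
theorem pvMain (index : Int) (ps : List (Int × List Int))
    (hpw : ps.Pairwise (fun p q => p.1 ≠ q.1)) :
    ([(ps.foldl (pvStep1 index) (0, none)).1,
      (ps.foldl (pvStep2 index (ps.foldl (pvStep1 index) (0, none)).1)
         ((ps.foldl (pvStep1 index) (0, none)).1, none)).1] : List Int) =
    [(ps.foldl (pvStepB index) ((0, none), (0, none))).1.1,
     if (ps.foldl (pvStepB index) ((0, none), (0, none))).2.2.isSome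
     then (ps.foldl (pvStepB index) ((0, none), (0, none))).2.1
     else (ps.foldl (pvStepB index) ((0, none), (0, none))).1.1] := by
  have hfst := pvFold_fst index ps (0, none) (0, none)
  have hsnd := pvFoldB_snd index ps (0, none) (0, none) hpw
  rw [pvFold2_filter]
  cases ps with
  | nil => simp
  | cons p rest =>
    have hb : (p :: rest).foldl (pvStep1 index) (0, none) ≠ ((0 : Int), (none : Option Int)) := by
      have h1 : (p :: rest).foldl (pvStep1 index) ((0 : Int), (none : Option Int))
          = rest.foldl (pvStep1 index) (p.1, some (pvVal index p)) := by
        simp [pvStep1, pvGtOpt]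
      intro hEq
      have := pvFold1_isSome index rest (p.1, some (pvVal index p)) rfl
      rw [← h1, hEq] at this
      simp at this
    rw [if_neg hb] at hsnd
    refine List.ext_getElem (by simp) ?_
    intro n h1 h2
    match n, h2 with
    | 0, _ =>
      simp only [List.getElem_cons_zero]
      exact (congrArg Prod.fst hfst).symm
    | 1, _ =>
      simp only [List.getElem_cons_succ, List.getElem_cons_zero]
      cases hF : (p :: rest).filter (fun q => decide (q.1 ≠ ((p :: rest).foldl (pvStep1 index) (0, none)).1)) with
      | nil =>
        rw [hF] at hsnd
        simp only [List.foldl_nil] at hsnd ⊢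
        have h22 := congrArg Prod.snd hsnd
        simp only [h22, Option.isSome_none, Bool.false_eq_true, if_false]
        exact (congrArg Prod.fst hfst).symm
      | cons q F' =>
        rw [hF] at hsnd
        have h22 := congrArg Prod.snd hsnd
        have h21 := congrArg Prod.fst hsnd
        have hagree := pvFold1_none_start index q F'
          ((p :: rest).foldl (pvStep1 index) (0, none)).1 0
        by_cases hs : ((q :: F').foldl (pvStep1 index) ((0 : Int), (none : Option Int))).2.isSome = true
        · rw [if_pos (by rw [h22]; exact hs), h21, hagree]
        · have hnone : ((q :: F').foldl (pvStep1 index) ((0 : Int), (none : Option Int))).2 = none := by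
            cases hh : ((q :: F').foldl (pvStep1 index) ((0 : Int), (none : Option Int))).2
            · rfl
            · rw [hh] at hs; simp at hs
          rw [if_neg (by intro hc; rw [h22] at hc; exact hs hc)]
          have hre : (q :: F').foldl (pvStep1 index)
              (((p :: rest).foldl (pvStep1 index) (0, none)).1, none)
              = (((p :: rest).foldl (pvStep1 index) (0, none)).1, none) :=
            pvFold1_none index (q :: F') _ (by rw [hagree]; exact hnone)
          rw [hre]
          exact (congrArg Prod.fst hfst).symm

-- ===== VERDICT (by name: the statement is the Claim_ definition above) =====
theorem separate_sides_spec : Claim_equal_separate_sides := by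
  intro va index _ _
  unfold Spec_separate_sides
  simp only [separate_sides, separate_sides_alt]
  exact pvMain index (PySem.List.enumerate va) (pvEnum_pairwise va)
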